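-- pv_equiv track=rewrite | github.com/marcoffee/evaluate | generate.py | iter_keys
-- ===== SOURCE A (Python) =====
-- def iter_keys (defaults, tests):
--     unique = set()
--
--     for key in defaults.keys():
--         yield key
--         unique.add(key)
--
--     for test in tests:
--         for key, _ in test:
--             if key not in unique:
--                 yield key
--                 unique.add(key)
-- ===== SOURCE B (Python) =====
-- def iter_keys(defaults, tests):
--     keys = [*defaults, *(k for test in tests for k, _ in test)]
--     yield from dict.fromkeys(keys)
-- ===== Notes on version B (the rewrite author's own statement) =====
-- stated objective: idiomatic
-- what changed: Replaces the manual running set with its membership branch by one concatenated key sequence passed through dict.fromkeys (ordered dedup) and a single yield-from.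
import Mathlib
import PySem

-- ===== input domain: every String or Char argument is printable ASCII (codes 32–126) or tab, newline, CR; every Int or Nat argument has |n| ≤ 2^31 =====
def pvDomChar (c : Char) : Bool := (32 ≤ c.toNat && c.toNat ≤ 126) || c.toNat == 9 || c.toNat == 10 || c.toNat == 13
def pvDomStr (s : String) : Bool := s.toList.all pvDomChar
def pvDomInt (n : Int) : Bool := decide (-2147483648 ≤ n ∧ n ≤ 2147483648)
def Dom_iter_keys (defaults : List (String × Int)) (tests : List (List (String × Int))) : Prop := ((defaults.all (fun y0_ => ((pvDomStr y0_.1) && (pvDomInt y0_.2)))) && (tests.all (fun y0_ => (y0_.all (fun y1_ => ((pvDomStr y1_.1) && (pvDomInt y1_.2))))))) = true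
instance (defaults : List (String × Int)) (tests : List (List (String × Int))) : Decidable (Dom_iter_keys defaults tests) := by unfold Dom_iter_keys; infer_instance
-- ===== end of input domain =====

-- ===== PORT A =====
-- B differs only in construction: one ordered-dedup pass instead of a running set with a membership branch.
def iter_keys (defaults : List (String × Int)) (tests : List (List (String × Int))) : List String :=
  -- for key in defaults.keys(): yield key; unique.add(key)
  let st1 := (PySem.Dict.ofList defaults).keys.foldl
    (fun (acc : List String × PySem.Set String) key => (acc.1 ++ [key], PySem.Set.add acc.2 key))
    ([], PySem.Set.empty)
  -- for test in tests: for key, _ in test: if key not in unique: yield key; unique.add(key)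
  let st2 := tests.foldl
    (fun acc test => test.foldl
      (fun (acc : List String × PySem.Set String) kv =>
        if PySem.Set.contains acc.2 kv.1 then acc
        else (acc.1 ++ [kv.1], PySem.Set.add acc.2 kv.1)) acc)
    st1
  st2.1

-- ===== PORT B =====
def iter_keys_alt (defaults : List (String × Int)) (tests : List (List (String × Int))) : List String :=
  -- keys = [*defaults, *(k for test in tests for k, _ in test)]; yield from dict.fromkeys(keys)
  let keys := (PySem.Dict.ofList defaults).keys ++ tests.flatMap (fun test => test.map Prod.fst)
  PySem.List.dedup keys

-- ===== PRECONDITION & SPEC =====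
def Spec_iter_keys (defaults : List (String × Int)) (tests : List (List (String × Int))) (out : List String) : Prop := out = iter_keys_alt defaults tests
instance (defaults : List (String × Int)) (tests : List (List (String × Int))) (out : List String) : Decidable (Spec_iter_keys defaults tests out) := by unfold Spec_iter_keys; infer_instance

-- ===== CLAIM (what is proved, stated in full; the proofs are below) =====
def Claim_equal_iter_keys : Prop := ∀ (defaults : List (String × Int)) (tests : List (List (String × Int))), Dom_iter_keys defaults tests → Spec_iter_keys defaults tests (iter_keys defaults tests)

-- ===== LEMMAS AND PROOFS =====

-- The unconditional first loop appends every key to the output and to the set.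
theorem pv_loop1 (l : List String) (out : List String) (s : PySem.Set String) :
    l.foldl (fun (acc : List String × PySem.Set String) key => (acc.1 ++ [key], PySem.Set.add acc.2 key)) (out, s)
      = (out ++ l, PySem.Set.update s l) := by
  induction l generalizing out s with
  | nil => simp [PySem.Set.update_nil]
  | cons x l ih => simp [List.foldl_cons, ih, PySem.Set.update_cons]

-- The guarded loop appends to the output exactly what Set.update appends to the set.
theorem pv_loop2 (l : List String) (out : List String) (s : PySem.Set String) :
    ∃ t, PySem.Set.update s l = s ++ t ∧
      l.foldl (fun (acc : List String × PySem.Set String) k =>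
          if PySem.Set.contains acc.2 k then acc else (acc.1 ++ [k], PySem.Set.add acc.2 k)) (out, s)
        = (out ++ t, s ++ t) := by
  induction l generalizing out s with
  | nil => exact ⟨[], by simp [PySem.Set.update_nil]⟩
  | cons x l ih =>
    by_cases hx : x ∈ s
    · obtain ⟨t, ht, hf⟩ := ih out s
      exact ⟨t, by simp [PySem.Set.update_cons, PySem.Set.add_of_mem hx, ht],
        by simpa [List.foldl_cons, hx] using hf⟩
    · obtain ⟨t, ht, hf⟩ := ih (out ++ [x]) (s ++ [x])
      refine ⟨x :: t, ?_, ?_⟩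
      · simpa [PySem.Set.update_cons, PySem.Set.add_of_not_mem hx] using ht
      · simpa [List.foldl_cons, hx, PySem.Set.add_of_not_mem hx] using hf

-- The nested pair loop is the guarded key loop over the flattened key list.
theorem pv_flatten (tests : List (List (String × Int))) (st : List String × PySem.Set String) :
    tests.foldl (fun acc test => test.foldl
        (fun (acc : List String × PySem.Set String) kv =>
          if PySem.Set.contains acc.2 kv.1 then acc
          else (acc.1 ++ [kv.1], PySem.Set.add acc.2 kv.1)) acc) st
      = (tests.flatMap (fun test => test.map Prod.fst)).foldl
        (fun (acc : List String × PySem.Set String) k =>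
          if PySem.Set.contains acc.2 k then acc else (acc.1 ++ [k], PySem.Set.add acc.2 k)) st := by
  induction tests generalizing st with
  | nil => rfl
  | cons test rest ih =>
    simp only [List.foldl_cons, List.flatMap_cons, List.foldl_append, ih, List.foldl_map]

-- ===== VERDICT (by name: the statement is the Claim_ definition above) =====
theorem iter_keys_spec : Claim_equal_iter_keys := by
  intro defaults tests _
  unfold Spec_iter_keys iter_keys iter_keys_alt
  have hnd : (PySem.Dict.ofList defaults).keys.Nodup := PySem.Dict.nodup_keys_ofList defaults
  set dkeys := (PySem.Dict.ofList defaults).keys with hdk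
  set allk := tests.flatMap (fun test => test.map Prod.fst) with hak
  have hself : PySem.Set.ofList dkeys = dkeys := PySem.Set.ofList_eq_self_of_nodup _ hnd
  have hself' : PySem.Set.update PySem.Set.empty dkeys = dkeys := by
    rw [show (PySem.Set.empty : PySem.Set String) = [] from rfl, PySem.Set.update_nil_left, hself]
  obtain ⟨t, ht, hf⟩ := pv_loop2 allk dkeys dkeys
  simp only [pv_flatten, pv_loop1, List.nil_append, hself', ← hak, hf]
  rw [PySem.List.dedup_eq_ofList, PySem.Set.ofList_append, hself, ht]
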